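-- pv_equiv track=rewrite | github.com/kbturk/AOC2015 | Day8.py | extra_wrapping
-- ===== SOURCE A (Python) =====
-- def extra_wrapping(line: str) -> str:
--     wrapping = ""
--
--     for i,c in enumerate(line):
--         if c == '"':
--             if i == 0:
--                 wrapping += '"\\"'
--             elif i == len(line)-1:
--                 wrapping += '\\""'
--             else:
--                 wrapping += '\\"'
--         elif c ==  '\\':
--            wrapping += '\\\\'
--         else:
--            wrapping += c
--     return wrapping
-- ===== SOURCE B (Python) =====
-- def extra_wrapping(line: str) -> str:
--     # two whole-string escape passes (backslash first), then boundary wrap quotes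
--     body = line.replace('\\', '\\\\').replace('"', '\\"')
--     pre = '"' if line.startswith('"') else ''
--     post = '"' if len(line) > 1 and line.endswith('"') else ''
--     return pre + body + post
-- ===== Notes on version B (the rewrite author's own statement) =====
-- stated objective: faster
-- what changed: Replaces A's single indexed enumerate loop with positional branches and quadratic string += by two whole-string replace passes (backslash then quote) plus boundary-quote guards outside any loop.
import Mathlib
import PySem

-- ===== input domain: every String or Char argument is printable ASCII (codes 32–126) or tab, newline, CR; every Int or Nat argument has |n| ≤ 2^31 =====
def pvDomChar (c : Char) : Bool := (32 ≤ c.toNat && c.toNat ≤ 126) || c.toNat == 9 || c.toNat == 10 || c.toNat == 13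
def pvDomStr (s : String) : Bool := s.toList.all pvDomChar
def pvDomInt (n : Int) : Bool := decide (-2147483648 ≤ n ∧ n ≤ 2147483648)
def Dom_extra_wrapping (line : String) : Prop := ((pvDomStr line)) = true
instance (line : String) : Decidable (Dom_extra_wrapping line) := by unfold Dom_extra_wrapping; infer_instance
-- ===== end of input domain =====

-- B replaces A's single indexed loop by two whole-string escape passes plus boundary-quote guards (idiomatic decomposition).

-- ===== PORT A =====
def extra_wrapping (line : String) : String :=
  let cs := line.toList
  String.mk ((PySem.List.enumerate cs 0).foldl (fun w ic =>
    if ic.2 = '"' then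
      if ic.1 = 0 then w ++ ['"', '\\', '"']
      else if ic.1 = (cs.length : Int) - 1 then w ++ ['\\', '"', '"']
      else w ++ ['\\', '"']
    else if ic.2 = '\\' then w ++ ['\\', '\\']
    else w ++ [ic.2]) [])

-- ===== PORT B =====
def extra_wrapping_alt (line : String) : String :=
  let cs := line.toList
  let body := PySem.Chars.replace (PySem.Chars.replace cs ['\\'] ['\\', '\\']) ['"'] ['\\', '"']
  let pre := if PySem.Chars.startswith cs ['"'] then ['"'] else ([] : List Char)
  let post := if decide (1 < cs.length) && PySem.Chars.endswith cs ['"'] then ['"'] else ([] : List Char)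
  String.mk (pre ++ body ++ post)

-- ===== PRECONDITION & SPEC =====
def Spec_extra_wrapping (line : String) (out : String) : Prop := out = extra_wrapping_alt line
instance (line : String) (out : String) : Decidable (Spec_extra_wrapping line out) := by unfold Spec_extra_wrapping; infer_instance

-- ===== CLAIM (what is proved, stated in full; the proofs are below) =====
def Claim_equal_extra_wrapping : Prop := ∀ (line : String), Dom_extra_wrapping line → Spec_extra_wrapping line (extra_wrapping line)

-- ===== LEMMAS AND PROOFS =====

-- per-char escape map (position-independent part of A's loop body)
def pvEsc (c : Char) : List Char :=
  if c = '"' then ['\\', '"'] else if c = '\\' then ['\\', '\\'] else [c]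

-- output of A's loop on the tail of the string (indices ≥ 1), last element special
def pvTailOut (n : Nat) : List Char → List Char
  | [] => []
  | [c] => if c = '"' then ['\\', '"', '"'] else pvEsc c
  | c :: d :: t => pvEsc c ++ pvTailOut n (d :: t)

theorem replace_go_single (a : Char) (new : List Char) :
    ∀ (l : List Char) (fuel : Nat) (acc : List Char), l.length ≤ fuel →
      PySem.Chars.replace.go [a] new fuel l acc
        = acc.reverse ++ l.flatMap (fun c => if c = a then new else [c]) := by
  intro l
  induction l with
  | nil =>
    intro fuel acc _
    cases fuel <;> simp [PySem.Chars.replace.go]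
  | cons c t ih =>
    intro fuel acc hle
    cases fuel with
    | zero => simp at hle
    | succ f =>
      by_cases hc : c = a
      · subst hc
        rw [PySem.Chars.replace.go]
        have hp : ([c].isPrefixOf (c :: t)) = true := by simp [List.isPrefixOf]
        rw [hp, if_pos rfl]
        simp only [List.length_cons, List.length_nil, List.drop_succ_cons, List.drop_zero]
        rw [ih f (new.reverse ++ acc) (by simp at hle; omega)]
        simp
      · rw [PySem.Chars.replace.go]
        have hp : ([a].isPrefixOf (c :: t)) = false := by
          simp [List.isPrefixOf]
          exact fun h => absurd h.symm hc
        rw [hp, if_neg (by simp)]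
        rw [ih f (c :: acc) (by simp at hle; omega)]
        simp [hc]

theorem replace_single (cs : List Char) (a : Char) (new : List Char) :
    PySem.Chars.replace cs [a] new = cs.flatMap (fun c => if c = a then new else [c]) := by
  rw [PySem.Chars.replace, if_neg (by simp)]
  simpa using replace_go_single a new cs cs.length [] (le_refl _)

theorem body_eq (cs : List Char) :
    PySem.Chars.replace (PySem.Chars.replace cs ['\\'] ['\\', '\\']) ['"'] ['\\', '"']
      = cs.flatMap pvEsc := by
  rw [replace_single, replace_single]
  induction cs with
  | nil => simp
  | cons c t ih =>
    by_cases h1 : c = '\\'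
    · subst h1; simp_all [pvEsc]
    · by_cases h2 : c = '"'
      · subst h2; simp_all [pvEsc]
      · simp_all [pvEsc]

theorem tailOut_eq (n : Nat) :
    ∀ t : List Char, t ≠ [] →
      pvTailOut n t = t.flatMap pvEsc ++ (if t.getLast? = some '"' then ['"'] else []) := by
  intro t
  induction t with
  | nil => intro h; exact absurd rfl h
  | cons c t ih =>
    intro _
    cases t with
    | nil =>
      by_cases h : c = '"' <;> simp [pvTailOut, pvEsc, h]
    | cons d t' =>
      rw [pvTailOut, ih (by simp)]
      simp [List.getLast?_cons_cons]

-- A's loop on the tail (all indices ≥ 1): foldl = acc ++ pvTailOut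
theorem foldl_tail (n : Nat) :
    ∀ (t : List Char) (s : Int) (acc : List Char), 1 ≤ s → s + t.length = n →
      (PySem.List.enumerate t s).foldl (fun w ic =>
        if ic.2 = '"' then
          if ic.1 = 0 then w ++ ['"', '\\', '"']
          else if ic.1 = (n : Int) - 1 then w ++ ['\\', '"', '"']
          else w ++ ['\\', '"']
        else if ic.2 = '\\' then w ++ ['\\', '\\']
        else w ++ [ic.2]) acc = acc ++ pvTailOut n t := by
  intro t
  induction t with
  | nil => intro s acc _ _; simp [PySem.List.enumerate_nil, pvTailOut]
  | cons c t ih =>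
    intro s acc hs hn
    rw [PySem.List.enumerate_cons, List.foldl_cons]
    have hs0 : s ≠ 0 := by omega
    cases t with
    | nil =>
      have hn' : s + 1 = (n : Int) := by simp at hn; omega
      have hlast : s = (n : Int) - 1 := by omega
      have h0 : ((n : Int) - 1) ≠ 0 := by omega
      simp only [PySem.List.enumerate_nil, List.foldl_nil]
      by_cases h : c = '"'
      · simp [h, hlast, h0, pvTailOut]
      · by_cases h2 : c = '\\' <;> simp [h, h2, pvTailOut, pvEsc]
    | cons d t' =>
      have hlast : s ≠ (n : Int) - 1 := by simp at hn; omega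
      rw [ih (s + 1) _ (by omega) (by simp at hn ⊢; omega)]
      by_cases h : c = '"'
      · simp [h, hs0, hlast, pvTailOut, pvEsc]
      · by_cases h2 : c = '\\' <;> simp [h, h2, pvTailOut, pvEsc]

theorem endswith_getLast (cs : List Char) :
    PySem.Chars.endswith cs ['"'] = (cs.getLast? == some '"') := by
  by_cases h : ∃ ys, cs = ys ++ ['"']
  · obtain ⟨ys, rfl⟩ := h
    simp [(PySem.Chars.endswith_iff (ys ++ ['"']) ['"']).mpr ⟨ys, rfl⟩]
  · have h1 : cs.getLast? ≠ some '"' := by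
      simp only [ne_eq, List.getLast?_eq_some_iff]; exact h
    have h2 : PySem.Chars.endswith cs ['"'] ≠ true := by
      intro hb
      exact h (by obtain ⟨p, hp⟩ := (PySem.Chars.endswith_iff cs ['"']).mp hb; exact ⟨p, hp.symm⟩)
    simp [Bool.eq_false_iff.mpr h2, beq_eq_false_iff_ne.mpr h1]

-- ===== VERDICT (by name: the statement is the Claim_ definition above) =====
theorem extra_wrapping_spec : Claim_equal_extra_wrapping := by
  intro line _
  unfold Spec_extra_wrapping extra_wrapping extra_wrapping_alt
  simp only []
  congr 1
  rw [body_eq]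
  cases hcs : line.toList with
  | nil => simp [PySem.List.enumerate_nil, PySem.Chars.startswith, endswith_getLast]
  | cons c0 t =>
    rw [PySem.List.enumerate_cons, List.foldl_cons]
    have hpre : PySem.Chars.startswith (c0 :: t) ['"'] = (c0 == '"') := by
      simp [PySem.Chars.startswith, List.isPrefixOf, eq_comm]
    cases t with
    | nil =>
      simp only [PySem.List.enumerate_nil, List.foldl_nil]
      rw [hpre, endswith_getLast]
      by_cases h : c0 = '"'
      · simp [h, pvEsc]
      · by_cases h2 : c0 = '\\' <;> simp [h, h2, pvEsc]
    | cons d t' =>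
      simp only [zero_add]
      rw [foldl_tail ((c0 :: d :: t').length) (d :: t') 1 _ (by omega) (by simp; omega)]
      rw [tailOut_eq _ _ (by simp), hpre, endswith_getLast]
      have hgl : (c0 :: d :: t').getLast? = (d :: t').getLast? := List.getLast?_cons_cons ..
      by_cases h : c0 = '"'
      · by_cases hl : (d :: t').getLast? = some '"' <;>
          simp [h, hl, pvEsc]
      · by_cases h2 : c0 = '\\' <;>
          by_cases hl : (d :: t').getLast? = some '"' <;>
            simp [h, h2, hl, hgl, pvEsc]
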